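-- pv_equiv track=rewrite | github.com/koninginsamira/advent_of_code_2020 | day_6/main.py | count_group_answers
-- ===== SOURCE A (Python) =====
-- def count_group_answers(group):
--     group_answer_count = []
--     for form in group:
--         answer_count = {}
--         for answer in form:
--             if answer in answer_count:
--                 answer_count[answer] += 1
--             else:
--                 answer_count[answer] = 1
--         group_answer_count.append(answer_count)
--     return group_answer_count
-- ===== SOURCE B (Python) =====
-- def count_group_answers(group):
--     def tally(form):
--         if not form:
--             return {}
--         rest = tally(form[1:])
--         first = form[0]
--         return {first: rest.pop(first, 0) + 1, **rest}
--     return [tally(form) for form in group]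
-- ===== Notes on version B (the rewrite author's own statement) =====
-- stated objective: alternative
-- what changed: B tallies each form by structural recursion — count the tail first, then merge the head character via rest.pop(first, 0) + 1 into a freshly built dict — instead of A's iterative per-character hash-increment loop; key order (first occurrence) and counts are identical.
import Mathlib
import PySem

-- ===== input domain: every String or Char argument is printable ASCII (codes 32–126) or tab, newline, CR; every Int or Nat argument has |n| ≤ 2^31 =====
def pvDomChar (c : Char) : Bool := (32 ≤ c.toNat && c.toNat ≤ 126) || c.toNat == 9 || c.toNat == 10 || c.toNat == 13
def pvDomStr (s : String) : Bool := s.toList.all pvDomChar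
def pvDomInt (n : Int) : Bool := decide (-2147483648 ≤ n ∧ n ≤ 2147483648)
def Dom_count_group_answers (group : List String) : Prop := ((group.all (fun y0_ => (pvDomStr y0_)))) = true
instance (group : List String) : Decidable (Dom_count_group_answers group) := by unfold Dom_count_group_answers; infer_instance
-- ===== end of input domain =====

-- B tallies each form RECURSIVELY: count the tail first, then merge the head character
-- into that dict ({first: rest.pop(first,0)+1, **rest}), instead of A's iterative
-- per-character increment loop (same values and key order; no speed claim).

-- ===== PORT A =====
-- iterating a Python str yields length-1 strings: the dict keys are Strings
def count_group_answers (group : List String) : List (List (String × Int)) :=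
  group.foldl (fun acc form =>
    acc ++ [((form.toList.map (fun c => String.ofList [c])).foldl
      (fun d a => if d.contains a then d.insert a (d.getD a 0 + 1) else d.insert a 1)
      PySem.Dict.empty).items]) []

-- ===== PORT B =====
-- tally(form): empty dict for "", else count the tail, then {first: rest.pop(first,0)+1, **rest}
-- (rest.pop(first, 0) = getD first 0 followed by erase first; the dict display with ** unpacking
--  inserts first's entry and then every item of the popped rest, in order)
def tallyD (chars : List String) : PySem.Dict String Int :=
  match chars with
  | [] => PySem.Dict.empty
  | first :: tail =>
    let rest := tallyD tail
    let v := rest.getD first 0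
    let rest2 := rest.erase first
    rest2.items.foldl (fun d p => d.insert p.1 p.2) (PySem.Dict.empty.insert first (v + 1))

def count_group_answers_alt (group : List String) : List (List (String × Int)) :=
  group.map (fun form => (tallyD (form.toList.map (fun c => String.ofList [c]))).items)

-- ===== PRECONDITION & SPEC =====
def Spec_count_group_answers (group : List String) (out : List (List (String × Int))) : Prop := out = count_group_answers_alt group
instance (group : List String) (out : List (List (String × Int))) : Decidable (Spec_count_group_answers group out) := by unfold Spec_count_group_answers; infer_instance

-- ===== CLAIM (what is proved, stated in full; the proofs are below) =====
def Claim_equal_count_group_answers : Prop := ∀ (group : List String), Dom_count_group_answers group → Spec_count_group_answers group (count_group_answers group)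

-- ===== LEMMAS AND PROOFS =====

-- B's recursive tally returns Counter(chars)'s items: keys in first-occurrence order, values = counts
lemma tally_items (chars : List String) :
    (tallyD chars).items
      = (PySem.Set.ofList chars).map (fun k => (k, (chars.count k : Int))) := by
  induction chars with
  | nil => simp [tallyD, PySem.Dict.empty]
  | cons c cs ih =>
    have hkeys : (tallyD cs).keys = PySem.Set.ofList cs := by
      simp [PySem.Dict.keys, ih, Function.comp_def]
    have hnodup : (tallyD cs).keys.Nodup := by
      rw [hkeys]; exact PySem.Set.nodup_ofList cs
    -- the popped value is the tail's count of c
    have hv : (tallyD cs).getD c 0 = (cs.count c : Int) := by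
      by_cases hc : c ∈ cs
      · have hmem : (c, (cs.count c : Int)) ∈ (tallyD cs).items := by
          rw [ih]
          exact List.mem_map.mpr ⟨c, by simpa [PySem.Set.mem_ofList] using hc, rfl⟩
        exact PySem.Dict.getD_of_mem_items _ hmem hnodup 0
      · have : (tallyD cs).get? c = none := by
          rw [PySem.Dict.get?_eq_none_iff_not_mem_keys, hkeys]
          simpa [PySem.Set.mem_ofList] using hc
        simp [PySem.Dict.getD, this, List.count_eq_zero_of_not_mem hc]
    -- the popped dict's items: the tail's counter with key c removed
    have herase : ((tallyD cs).erase c).items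
        = ((PySem.Set.ofList cs).filter (fun y => !(y == c))).map
            (fun k => (k, (cs.count k : Int))) := by
      simp only [PySem.Dict.erase, ih]
      rw [List.filter_map]
      rfl
    show (((tallyD cs).erase c).items.foldl (fun d p => d.insert p.1 p.2)
        (PySem.Dict.empty.insert c ((tallyD cs).getD c 0 + 1))).items = _
    rw [PySem.Dict.items_foldl_insert_fresh _ Prod.fst Prod.snd _
        (by
          intro p hp
          rw [herase] at hp
          obtain ⟨k, hk, rfl⟩ := List.mem_map.mp hp
          have hkc : (k == c) = false := by
            have := List.of_mem_filter hk
            simpa using this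
          have hck : ¬ c = k := fun h => by simp [h] at hkc
          simp [PySem.Dict.contains, PySem.Dict.insert, PySem.Dict.empty, hck])
        (by
          rw [herase, List.map_map]
          have : (Prod.fst ∘ fun k => (k, (cs.count k : Int))) = id := rfl
          rw [this, List.map_id]
          exact ((PySem.Set.nodup_ofList cs).filter _))]
    rw [herase, hv]
    rw [PySem.Set.ofList_cons, List.map_cons]
    have hdisc : (PySem.Set.ofList cs).discard c
        = (PySem.Set.ofList cs).filter (fun y => !(y == c)) := by
      simp [PySem.Set.discard]
    rw [hdisc]
    have hhead : (PySem.Dict.empty.insert c ((cs.count c : Int) + 1)).items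
        = [(c, ((c :: cs).count c : Int))] := by
      simp [PySem.Dict.insert, PySem.Dict.empty, PySem.Dict.contains,
        List.count_cons_self]
    rw [hhead, List.singleton_append, List.map_map]
    congr 1
    refine List.map_congr_left (fun k hk => ?_)
    have hkc : (k == c) = false := by simpa using List.of_mem_filter hk
    have hne : k ≠ c := by simpa using hkc
    simp [Ne.symm hne]

-- A's per-form if/insert loop is Counter(chars): the not-yet-present branch inserts 1 = getD+1
lemma form_loop_eq_counter (chars : List String) :
    chars.foldl (fun d a => if d.contains a then d.insert a (d.getD a 0 + 1) else d.insert a 1)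
      PySem.Dict.empty = PySem.Dict.counter chars := by
  rw [← PySem.Dict.foldl_insert_getD_add_one_eq_counter]
  congr 1
  funext d a
  by_cases h : d.contains a = true
  · simp [h]
  · simp [h, PySem.Dict.getD_of_not_contains (d := d) (k := a) (d0 := 0) (by simpa using h)]

-- ===== VERDICT (by name: the statement is the Claim_ definition above) =====
theorem count_group_answers_spec : Claim_equal_count_group_answers := by
  intro group _
  show _ = _
  unfold count_group_answers count_group_answers_alt
  rw [PySem.List.foldl_append_singleton_eq_map]
  refine List.map_congr_left (fun form _ => ?_)
  rw [form_loop_eq_counter, PySem.Dict.items_counter, tally_items]
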